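-- pv_equiv track=rewrite | github.com/marmikc/programming-problems | cache-replacement-policies/least-recently-used/TestLRU_RandomizedInput.py | build_correct_cache_state
-- ===== SOURCE A (Python) =====
-- CACHE_SIZE = 5
--
-- def build_correct_cache_state(previous_calls):
--     """The correct cache state is the last CACHE_SIZE calls, no duplicates"""
--     correct_cache = []
--     count = 0
--     while len(correct_cache) < CACHE_SIZE:
--         index = len(previous_calls) - 1 - count
--         if index < 0:
--             break
--
--         item = previous_calls[index]
--
--         if item not in correct_cache:
--             correct_cache.append(item)
--
--         count += 1
--
--     return correct_cache
-- ===== SOURCE B (Python) =====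
-- CACHE_SIZE = 5
--
-- def build_correct_cache_state(previous_calls):
--     """The correct cache state is the last CACHE_SIZE calls, no duplicates"""
--     last_seen = {}
--     for i, item in enumerate(previous_calls):
--         last_seen[item] = i
--     return sorted(last_seen, key=last_seen.get, reverse=True)[:CACHE_SIZE]
-- ===== Notes on version B (the rewrite author's own statement) =====
-- stated objective: alternative
-- what changed: Instead of scanning backward from the end with a membership-tested accumulator, B makes one forward pass recording each item's last-seen index in a dict and then sorts the distinct items by that index in descending order, truncating to CACHE_SIZE.
import Mathlib
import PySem

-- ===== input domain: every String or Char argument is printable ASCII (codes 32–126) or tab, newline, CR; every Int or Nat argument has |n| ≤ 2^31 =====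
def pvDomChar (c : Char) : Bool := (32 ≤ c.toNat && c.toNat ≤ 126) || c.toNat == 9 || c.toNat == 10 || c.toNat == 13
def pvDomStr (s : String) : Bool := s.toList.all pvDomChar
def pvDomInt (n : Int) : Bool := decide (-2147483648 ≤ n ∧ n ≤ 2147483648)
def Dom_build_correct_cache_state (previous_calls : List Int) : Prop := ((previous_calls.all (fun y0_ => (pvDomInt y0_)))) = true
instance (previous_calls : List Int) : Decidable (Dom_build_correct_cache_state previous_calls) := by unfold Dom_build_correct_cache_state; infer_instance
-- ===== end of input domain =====

-- B replaces A's backward scan with a membership-tested accumulator by a forward pass recording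
-- each item's last-seen index in a dict, then a descending sort of the distinct items by that index
-- truncated to CACHE_SIZE (a different algorithm: hash pass + sort instead of a bounded backward scan).


-- ===== PORT A =====
-- A's while-loop: state (correct_cache, count); stops when the cache has 5 items or the index runs off the front.
def pvLoopA (prev cache : List Int) (count : Nat) : List Int :=
  if cache.length < 5 then
    let index : Int := (prev.length : Int) - 1 - (count : Int)
    if hidx : index < 0 then cache
    else
      match PySem.List.pyGet? prev index with
      | none => cache   -- unreachable: 0 ≤ index < len(prev)
      | some item =>
        pvLoopA prev (if cache.contains item then cache else cache ++ [item]) (count + 1)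
  else cache
termination_by prev.length - count
decreasing_by omega

def build_correct_cache_state (previous_calls : List Int) : List Int :=
  pvLoopA previous_calls [] 0

-- ===== PORT B =====
-- last_seen = {}; for i, item in enumerate(previous_calls): last_seen[item] = i
-- return sorted(last_seen, key=last_seen.get, reverse=True)[:CACHE_SIZE]
-- ('last_seen.get' is ported as 'getD k 0': every key handed to the sort is a key of the dict,
--  so the default is never consulted.)
def build_correct_cache_state_alt (previous_calls : List Int) : List Int :=
  let last_seen : PySem.Dict Int Int :=
    (PySem.List.enumerate previous_calls).foldl (fun d p => d.insert p.2 p.1) PySem.Dict.empty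
  (PySem.List.sorted last_seen.keys (fun k => last_seen.getD k 0) true).take 5

-- ===== PRECONDITION & SPEC =====
def Spec_build_correct_cache_state (previous_calls : List Int) (out : List Int) : Prop := out = build_correct_cache_state_alt previous_calls
instance (previous_calls : List Int) (out : List Int) : Decidable (Spec_build_correct_cache_state previous_calls out) := by unfold Spec_build_correct_cache_state; infer_instance

-- ===== CLAIM (what is proved, stated in full; the proofs are below) =====
def Claim_equal_build_correct_cache_state : Prop := ∀ (previous_calls : List Int), Dom_build_correct_cache_state previous_calls → Spec_build_correct_cache_state previous_calls (build_correct_cache_state previous_calls)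

-- ===== LEMMAS AND PROOFS =====

-- ---------- A-side: A's loop computes (dedup of the reversed input).take 5 ----------

-- A's loop rephrased as a structural recursion over the not-yet-scanned suffix of the reversed input.
def pvGo (xs cache : List Int) : List Int :=
  if cache.length < 5 then
    match xs with
    | [] => cache
    | x :: rest => pvGo rest (PySem.Set.add cache x)
  else cache

lemma pvGo_nil (c : List Int) : pvGo [] c = c := by
  rw [pvGo.eq_def]; split <;> rfl

lemma pvGo_cons (x : Int) (xs c : List Int) (h : c.length < 5) :
    pvGo (x :: xs) c = pvGo xs (PySem.Set.add c x) := by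
  rw [pvGo.eq_def]; simp [h]

lemma pvGo_full (xs c : List Int) (h : ¬ c.length < 5) : pvGo xs c = c := by
  rw [pvGo.eq_def]; simp [h]

lemma pvLoopA_eq_go (prev cache : List Int) (count : Nat) :
    pvLoopA prev cache count = pvGo (prev.reverse.drop count) cache := by
  fun_induction pvLoopA prev cache count with
  | case1 cache count hlen index hidx =>
    have hidx' : (prev.length : Int) - 1 - (count : Int) < 0 := hidx
    have : prev.length ≤ count := by omega
    rw [List.drop_eq_nil_of_le (by simpa using this), pvGo_nil]
  | case2 cache count hlen index hidx hget =>
    exfalso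
    have hidx' : ¬ (prev.length : Int) - 1 - (count : Int) < 0 := hidx
    have hc : count < prev.length := by omega
    have hi : ((prev.length : Int) - 1 - (count : Int)) = ((prev.length - 1 - count : Nat) : Int) := by
      omega
    have hget' : PySem.List.pyGet? prev ((prev.length : Int) - 1 - (count : Int)) = none := hget
    rw [hi, PySem.List.pyGet?_natCast, List.getElem?_eq_getElem (by omega)] at hget'
    simp at hget'
  | case3 cache count hlen index hidx item hget ih =>
    have hidx' : ¬ (prev.length : Int) - 1 - (count : Int) < 0 := hidx
    have hc : count < prev.length := by omega
    have hcr : count < prev.reverse.length := by simpa using hc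
    have hi : ((prev.length : Int) - 1 - (count : Int)) = ((prev.length - 1 - count : Nat) : Int) := by
      omega
    have hget' : PySem.List.pyGet? prev ((prev.length : Int) - 1 - (count : Int)) = some item := hget
    rw [hi, PySem.List.pyGet?_natCast, List.getElem?_eq_getElem (by omega)] at hget'
    have hitem : prev.reverse[count]'hcr = item := by
      rw [List.getElem_reverse]
      exact Option.some.inj hget'
    have hdrop : prev.reverse.drop count
        = prev.reverse[count]'hcr :: prev.reverse.drop (count + 1) :=
      List.drop_eq_getElem_cons hcr
    rw [hdrop, pvGo_cons _ _ _ hlen, hitem]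
    by_cases hmem : item ∈ cache
    · simp only [List.contains_eq_mem, hmem, decide_true, if_true, dif_pos] at ih ⊢
      rw [ih]
      congr 1
      simp [PySem.Set.add, hmem]
    · simp only [List.contains_eq_mem, hmem, decide_false, Bool.false_eq_true, if_false,
        dif_neg, not_false_iff] at ih ⊢
      rw [ih]
      congr 1
      simp [PySem.Set.add, hmem]
  | case4 cache count hlen =>
    rw [pvGo_full _ _ hlen]

-- Set.add only appends at the back, so a foldl over it keeps cache as a prefix.
lemma foldl_add_prefix (xs cache : List Int) :
    ∃ t, xs.foldl PySem.Set.add cache = cache ++ t := by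
  induction xs generalizing cache with
  | nil => exact ⟨[], by simp⟩
  | cons x xs ih =>
    obtain ⟨t, ht⟩ := ih (PySem.Set.add cache x)
    have hadd : ∃ s, PySem.Set.add cache x = cache ++ s := by
      by_cases h : x ∈ cache
      · exact ⟨[], by simp [PySem.Set.add, h]⟩
      · exact ⟨[x], by simp [PySem.Set.add, h]⟩
    obtain ⟨s, hs⟩ := hadd
    refine ⟨s ++ t, ?_⟩
    rw [List.foldl_cons, ht, hs, List.append_assoc]

lemma go_eq_take_foldl (xs cache : List Int) (h : cache.length ≤ 5) :
    pvGo xs cache = (xs.foldl PySem.Set.add cache).take 5 := by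
  induction xs generalizing cache with
  | nil => rw [pvGo_nil, List.foldl_nil, List.take_of_length_le h]
  | cons x xs ih =>
    by_cases hlen : cache.length < 5
    · have hstep : (PySem.Set.add cache x).length ≤ 5 := by
        simp only [PySem.Set.add]
        split
        · omega
        · simp; omega
      rw [pvGo_cons _ _ _ hlen, List.foldl_cons]
      exact ih _ hstep
    · have h5 : cache.length = 5 := by omega
      obtain ⟨t, ht⟩ := foldl_add_prefix (x :: xs) cache
      rw [pvGo_full _ _ hlen, ht, List.take_append_of_le_length (by omega),
        List.take_of_length_le (by omega)]

lemma portA_eq_take_dedup (prev : List Int) :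
    build_correct_cache_state prev = (PySem.List.dedup prev.reverse).take 5 := by
  rw [build_correct_cache_state, pvLoopA_eq_go, List.drop_zero,
    go_eq_take_foldl _ _ (by simp), PySem.List.dedup_eq_ofList, PySem.Set.ofList_eq_foldl]

-- ---------- B-side dict: keys and stored values ----------

def pvDictOf (prev : List Int) : PySem.Dict Int Int :=
  (PySem.List.enumerate prev).foldl (fun d p => d.insert p.2 p.1) PySem.Dict.empty

lemma pvDictOf_keys (prev : List Int) : (pvDictOf prev).keys = PySem.Set.ofList prev := by
  have h := PySem.Dict.keys_foldl_insert_key (ν := Int)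
      (PySem.List.enumerate prev) (fun p => p.2) (fun _ p => p.1) PySem.Dict.empty
  simpa [pvDictOf, PySem.List.map_snd_enumerate, PySem.Set.update_eq_foldl,
    PySem.Set.ofList_eq_foldl] using h

-- the value stored at a key is its LAST index in prev, i.e. len - 1 - (first index in prev.reverse)
lemma pvDictOf_getD (prev : List Int) (k : Int) (hk : k ∈ prev) :
    (pvDictOf prev).getD k 0 = (prev.length : Int) - 1 - (prev.reverse.idxOf k : Int) := by
  induction prev using List.reverseRecOn with
  | nil => simp at hk
  | append_singleton ys x ih =>
    have hdict : pvDictOf (ys ++ [x]) = (pvDictOf ys).insert x (ys.length : Int) := by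
      simp [pvDictOf, PySem.List.enumerate_append, PySem.List.enumerate_cons,
        PySem.List.enumerate_nil]
    rw [hdict, PySem.Dict.getD_insert, List.reverse_append]
    by_cases hx : k = x
    · subst hx
      simp
    · have hkys : k ∈ ys := by
        rcases List.mem_append.mp hk with h | h
        · exact h
        · simp at h; exact absurd h hx
      rw [if_neg hx, ih hkys]
      have hsh : ([x] : List Int).reverse ++ ys.reverse = x :: ys.reverse := by simp
      rw [hsh, List.idxOf_cons_ne _ (Ne.symm hx)]
      have := List.idxOf_lt_length_of_mem (List.mem_reverse.mpr hkys)
      simp only [List.length_append, List.length_singleton, Nat.succ_eq_add_one]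
      push_cast
      omega

-- ---------- dedup keeps first occurrences in order of first occurrence ----------

-- adding an element already present is a no-op, so filtering it out of the rest changes nothing
lemma foldl_add_filter_of_mem (xs : List Int) (s : List Int) (x : Int) (hx : x ∈ s) :
    xs.foldl PySem.Set.add s = (xs.filter (fun y => y != x)).foldl PySem.Set.add s := by
  induction xs generalizing s with
  | nil => simp
  | cons y ys ih =>
    by_cases hyx : y = x
    · subst hyx
      have : PySem.Set.add s y = s := by simp [PySem.Set.add, hx]
      simp [this, ih s hx]
    · have hmem : x ∈ PySem.Set.add s y := (PySem.Set.mem_add s y x).mpr (Or.inl hx)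
      simp [hyx, ih _ hmem]

-- an element absent from the rest stays at the head of the accumulator
lemma foldl_add_cons_of_not_mem (xs : List Int) (s : List Int) (x : Int) (hx : x ∉ xs) :
    xs.foldl PySem.Set.add (x :: s) = x :: xs.foldl PySem.Set.add s := by
  induction xs generalizing s with
  | nil => simp
  | cons y ys ih =>
    have hyx : y ≠ x := fun h => hx (h ▸ List.mem_cons_self)
    have hstep : PySem.Set.add (x :: s) y = x :: PySem.Set.add s y := by
      simp only [PySem.Set.add, PySem.Set.contains, List.contains_cons]
      have : (y == x) = false := by simpa using hyx
      rw [this]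
      simp only [Bool.false_or]
      split <;> simp
    rw [List.foldl_cons, hstep, ih _ (fun h => hx (List.mem_cons_of_mem _ h)), List.foldl_cons]

lemma ofList_cons (x : Int) (xs : List Int) :
    PySem.Set.ofList (x :: xs) = x :: PySem.Set.ofList (xs.filter (fun y => y != x)) := by
  have h0 : PySem.Set.ofList (x :: xs) = xs.foldl PySem.Set.add [x] := by
    rw [PySem.Set.ofList_eq_foldl]; rfl
  rw [h0, foldl_add_filter_of_mem xs [x] x (by simp),
    foldl_add_cons_of_not_mem _ _ _ (by simp), PySem.Set.ofList_eq_foldl]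

-- filtering preserves relative order of the surviving elements
lemma idxOf_filter_lt (xs : List Int) (p : Int → Bool) (a b : Int)
    (ha : a ∈ xs.filter p) (hb : b ∈ xs.filter p)
    (h : (xs.filter p).idxOf a < (xs.filter p).idxOf b) : xs.idxOf a < xs.idxOf b := by
  induction xs with
  | nil => simp at ha
  | cons y ys ih =>
    by_cases hpy : p y
    · rw [List.filter_cons_of_pos hpy] at ha hb h
      by_cases hay : a = y
      · subst hay
        have hba : b ≠ a := by
          intro hba; subst hba; simp at h
        rw [List.idxOf_cons_self] at h ⊢
        rw [List.idxOf_cons_ne _ (Ne.symm hba)]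
        omega
      · have hby : b ≠ y := by
          intro hby; subst hby
          rw [List.idxOf_cons_self] at h; omega
        rw [List.idxOf_cons_ne _ (Ne.symm hay), List.idxOf_cons_ne _ (Ne.symm hby)] at h
        rw [List.idxOf_cons_ne _ (Ne.symm hay), List.idxOf_cons_ne _ (Ne.symm hby)]
        have ha' : a ∈ ys.filter p := by
          rcases List.mem_cons.mp ha with h' | h'
          · exact absurd h' hay
          · exact h'
        have hb' : b ∈ ys.filter p := by
          rcases List.mem_cons.mp hb with h' | h'
          · exact absurd h' hby
          · exact h'
        have := ih ha' hb' (by omega)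
        omega
    · rw [List.filter_cons_of_neg (by simpa using hpy)] at ha hb h
      have hay : a ≠ y := by
        intro h'; subst h'
        have := List.of_mem_filter ha
        exact hpy (by simpa using this)
      have hby : b ≠ y := by
        intro h'; subst h'
        have := List.of_mem_filter hb
        exact hpy (by simpa using this)
      rw [List.idxOf_cons_ne _ (Ne.symm hay), List.idxOf_cons_ne _ (Ne.symm hby)]
      have := ih ha hb h
      omega

-- along dedup xs, first-occurrence indices strictly increase
lemma pairwise_ofList_idxOf :
    ∀ (n : Nat) (xs : List Int), xs.length ≤ n →
      (PySem.Set.ofList xs).Pairwise (fun a b => xs.idxOf a < xs.idxOf b) := by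
  intro n
  induction n with
  | zero =>
    intro xs h
    have : xs = [] := List.eq_nil_of_length_eq_zero (by omega)
    subst this
    simp [PySem.Set.ofList]
  | succ n ih =>
    intro xs h
    match xs with
    | [] => simp [PySem.Set.ofList]
    | x :: rest =>
      rw [ofList_cons, List.pairwise_cons]
      constructor
      · intro b hb
        have hb' : b ∈ rest.filter (fun y => y != x) := (PySem.Set.mem_ofList _ _).mp hb
        have hbx : b ≠ x := by simpa using List.of_mem_filter hb'
        have hbr : b ∈ rest := List.mem_of_mem_filter hb'
        rw [List.idxOf_cons_self, List.idxOf_cons_ne _ (Ne.symm hbx)]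
        omega
      · have hlen : (rest.filter (fun y => y != x)).length ≤ n := by
          have := List.length_filter_le (fun y => y != x) rest
          simp at h
          omega
        have hp := ih _ hlen
        refine hp.imp_of_mem ?_
        intro a b ha hb hab
        have ha' := (PySem.Set.mem_ofList _ _).mp ha
        have hb' := (PySem.Set.mem_ofList _ _).mp hb
        have hax : a ≠ x := by simpa using List.of_mem_filter ha'
        have hbx : b ≠ x := by simpa using List.of_mem_filter hb'
        rw [List.idxOf_cons_ne _ (Ne.symm hax), List.idxOf_cons_ne _ (Ne.symm hbx)]
        have := idxOf_filter_lt rest _ a b ha' hb' hab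
        omega

-- ---------- B computes the same take-5 of the reversed dedup ----------

lemma portB_eq_take_dedup (prev : List Int) :
    build_correct_cache_state_alt prev = (PySem.List.dedup prev.reverse).take 5 := by
  show (PySem.List.sorted (pvDictOf prev).keys (fun k => (pvDictOf prev).getD k 0) true).take 5
      = (PySem.List.dedup prev.reverse).take 5
  congr 1
  apply PySem.List.sorted_rev_eq_of_perm_of_pairwise_gt
  · rw [pvDictOf_keys, PySem.List.dedup_eq_ofList]
    rw [List.perm_ext_iff_of_nodup (PySem.Set.nodup_ofList _) (PySem.Set.nodup_ofList _)]
    intro a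
    rw [PySem.Set.mem_ofList, PySem.Set.mem_ofList, List.mem_reverse]
  · rw [PySem.List.dedup_eq_ofList]
    refine (pairwise_ofList_idxOf prev.reverse.length prev.reverse le_rfl).imp_of_mem ?_
    intro a b ha hb hab
    have ha' := List.mem_reverse.mp ((PySem.Set.mem_ofList _ _).mp ha)
    have hb' := List.mem_reverse.mp ((PySem.Set.mem_ofList _ _).mp hb)
    rw [pvDictOf_getD prev a ha', pvDictOf_getD prev b hb']
    omega

-- ===== VERDICT (by name: the statement is the Claim_ definition above) =====
theorem build_correct_cache_state_spec : Claim_equal_build_correct_cache_state := by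
  intro prev _
  show build_correct_cache_state prev = build_correct_cache_state_alt prev
  rw [portA_eq_take_dedup, portB_eq_take_dedup]
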